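-- pv_equiv track=rewrite | github.com/abundant-ai/oddish | oddish/src/oddish/workers/queue/dispatch_planner.py | build_spawn_plan
-- ===== SOURCE A (Python) =====
-- def build_spawn_plan(
--     queue_counts: dict[str, dict[str, int]],
--     concurrency_limits: dict[str, int],
--     max_workers: int,
-- ) -> list[str]:
--     """Decide which queue-specific workers to spawn this cycle."""
--     queue_keys = sorted(set(queue_counts.keys()) | set(concurrency_limits.keys()))
--     capacity_by_queue: dict[str, int] = {}
--     for queue_key in queue_keys:
--         queued = queue_counts.get(queue_key, {}).get("queued", 0)
--         running = queue_counts.get(queue_key, {}).get("picked", 0)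
--         limit = concurrency_limits.get(queue_key, 0)
--         capacity_by_queue[queue_key] = max(min(queued, limit - running), 0)
--
--     total_capacity = sum(capacity_by_queue.values())
--     if total_capacity <= 0 or max_workers <= 0:
--         return []
--
--     workers_to_spawn = min(total_capacity, max_workers)
--     spawn_plan: list[str] = []
--     while len(spawn_plan) < workers_to_spawn:
--         progressed = False
--         for queue_key in queue_keys:
--             if len(spawn_plan) >= workers_to_spawn:
--                 break
--             if capacity_by_queue.get(queue_key, 0) > 0:
--                 spawn_plan.append(queue_key)
--                 capacity_by_queue[queue_key] -= 1
--                 progressed = True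
--         if not progressed:
--             break
--     return spawn_plan
-- ===== SOURCE B (Python) =====
-- def build_spawn_plan(
--     queue_counts: dict[str, dict[str, int]],
--     concurrency_limits: dict[str, int],
--     max_workers: int,
-- ) -> list[str]:
--     """Decide which queue-specific workers to spawn this cycle.
--
--     Slot-token construction instead of simulating round-robin passes:
--     emit one (round, queue) token per potential spawn slot and sort the
--     tokens; lexicographic order on (round, queue) IS queue-fair order.
--     """
--     if max_workers <= 0:
--         return []
--     caps: dict[str, int] = {}
--     for key in set(queue_counts) | set(concurrency_limits):
--         counts = queue_counts.get(key, {})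
--         capacity = min(counts.get("queued", 0),
--                        concurrency_limits.get(key, 0) - counts.get("picked", 0))
--         if capacity > 0:
--             caps[key] = capacity
--     target = min(sum(caps.values()), max_workers)
--     slots = sorted((r, key)
--                    for key, capacity in caps.items()
--                    for r in range(min(capacity, target)))
--     return [key for _, key in slots[:target]]
-- ===== Notes on version B (the rewrite author's own statement) =====
-- stated objective: alternative
-- what changed: A simulates round-robin passes (rescanning the full key list each round over a mutable capacity dict with a mid-round break); B never loops over rounds at all: it emits one (round, queue) slot token per potential spawn, sorts the tokens once, and truncates - lexicographic order on (round, queue) is exactly queue-fair order.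
import Mathlib
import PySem

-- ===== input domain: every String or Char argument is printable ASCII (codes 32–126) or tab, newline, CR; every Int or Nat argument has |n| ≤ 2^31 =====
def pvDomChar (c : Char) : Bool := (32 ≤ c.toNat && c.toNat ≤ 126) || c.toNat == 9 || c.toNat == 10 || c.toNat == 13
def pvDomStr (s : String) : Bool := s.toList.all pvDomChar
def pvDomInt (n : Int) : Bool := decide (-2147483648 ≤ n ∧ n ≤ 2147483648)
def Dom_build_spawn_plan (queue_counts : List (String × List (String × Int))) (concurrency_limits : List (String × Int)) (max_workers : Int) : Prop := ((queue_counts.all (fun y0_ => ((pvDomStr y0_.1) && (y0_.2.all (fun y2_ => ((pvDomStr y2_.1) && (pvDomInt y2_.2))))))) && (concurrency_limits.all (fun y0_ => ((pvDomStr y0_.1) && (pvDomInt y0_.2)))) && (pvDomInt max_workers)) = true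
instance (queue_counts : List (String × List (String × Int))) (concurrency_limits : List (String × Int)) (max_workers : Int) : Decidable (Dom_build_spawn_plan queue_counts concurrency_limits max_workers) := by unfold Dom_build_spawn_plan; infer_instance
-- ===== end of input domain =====

-- B replaces A's simulation of round-robin passes (rescanning every queue per round with a
-- mid-round break) by a slot-token construction: one (round, queue) token per spawn slot,
-- sorted lexicographically and truncated (objective: alternative).

-- ===== PORT A =====
-- sorted(set(queue_counts.keys()) | set(concurrency_limits.keys()))
def pvKeysA (queue_counts : List (String × List (String × Int))) (concurrency_limits : List (String × Int)) : List String :=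
  PySem.List.sorted (PySem.Set.union (PySem.Set.ofList (queue_counts.map Prod.fst)) (concurrency_limits.map Prod.fst)) (fun x => x) false

-- max(min(queued, limit - running), 0) for one queue_key
def pvCapA (queue_counts : List (String × List (String × Int))) (concurrency_limits : List (String × Int)) (queue_key : String) : Int :=
  let queued := (PySem.Dict.mk ((PySem.Dict.mk queue_counts).getD queue_key [])).getD "queued" 0
  let running := (PySem.Dict.mk ((PySem.Dict.mk queue_counts).getD queue_key [])).getD "picked" 0
  let limit := (PySem.Dict.mk concurrency_limits).getD queue_key 0
  max (min queued (limit - running)) 0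

-- the inner 'for queue_key in queue_keys' loop (with its break); state (cap, plan, progressed)
-- ('capacity_by_queue[queue_key] -= 1' is Dict.modify; the key is always present here)
def pvInnerA (target : Nat) : List String → PySem.Dict String Int → List String → Bool → PySem.Dict String Int × List String × Bool
  | [], cap, plan, prog => (cap, plan, prog)
  | k :: ks, cap, plan, prog =>
    if target ≤ plan.length then (cap, plan, prog)
    else if 0 < cap.getD k 0 then
      pvInnerA target ks (cap.modify k 0 (· - 1)) (plan ++ [k]) true
    else pvInnerA target ks cap plan prog

-- the outer 'while len(spawn_plan) < workers_to_spawn' loop; fuel makes it total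
-- (each productive pass appends at least one worker, so fuel = target + 1 is never exhausted)
def pvOuterA (fuel : Nat) (keys : List String) (target : Nat) (cap : PySem.Dict String Int) (plan : List String) : List String :=
  match fuel with
  | 0 => plan
  | f + 1 =>
    if target ≤ plan.length then plan
    else
      let r := pvInnerA target keys cap plan false
      if r.2.2 then pvOuterA f keys target r.1 r.2.1 else r.2.1

def build_spawn_plan (queue_counts : List (String × List (String × Int))) (concurrency_limits : List (String × Int)) (max_workers : Int) : List String :=
  let queue_keys := pvKeysA queue_counts concurrency_limits
  let cap := queue_keys.foldl (fun d k => d.insert k (pvCapA queue_counts concurrency_limits k)) PySem.Dict.empty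
  let total := cap.values.sum
  if total ≤ 0 ∨ max_workers ≤ 0 then []
  else
    let target := min total max_workers
    pvOuterA (target.toNat + 1) queue_keys target.toNat cap []

-- ===== PORT B =====
-- min(counts.get("queued", 0), concurrency_limits.get(key, 0) - counts.get("picked", 0))
def pvCapB (queue_counts : List (String × List (String × Int))) (concurrency_limits : List (String × Int)) (key : String) : Int :=
  let counts := (PySem.Dict.mk queue_counts).getD key []
  min ((PySem.Dict.mk counts).getD "queued" 0)
    ((PySem.Dict.mk concurrency_limits).getD key 0 - (PySem.Dict.mk counts).getD "picked" 0)

-- the 'for key in set(queue_counts) | set(concurrency_limits): … caps[key] = capacity' loop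
-- (the output is invariant under the set's iteration order: the tokens are sorted afterwards)
def pvCapsB (queue_counts : List (String × List (String × Int))) (concurrency_limits : List (String × Int)) : List String → List (String × Int)
  | [] => []
  | k :: ks =>
    let capacity := pvCapB queue_counts concurrency_limits k
    if 0 < capacity then (k, capacity) :: pvCapsB queue_counts concurrency_limits ks
    else pvCapsB queue_counts concurrency_limits ks

def build_spawn_plan_alt (queue_counts : List (String × List (String × Int))) (concurrency_limits : List (String × Int)) (max_workers : Int) : List String :=
  if max_workers ≤ 0 then []
  else
    let caps := pvCapsB queue_counts concurrency_limits
      (PySem.Set.union (PySem.Set.ofList (queue_counts.map Prod.fst)) (concurrency_limits.map Prod.fst))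
    let target := min (caps.map Prod.snd).sum max_workers
    let slots := PySem.List.sorted2
      (caps.flatMap (fun p => (PySem.List.pyRange 0 (min p.2 target)).map (fun r => (r, p.1))))
      Prod.fst Prod.snd
    (PySem.List.slice slots none (some target)).map Prod.snd

-- ===== PRECONDITION & SPEC =====
def Spec_build_spawn_plan (queue_counts : List (String × List (String × Int))) (concurrency_limits : List (String × Int)) (max_workers : Int) (out : List String) : Prop := out = build_spawn_plan_alt queue_counts concurrency_limits max_workers
instance (queue_counts : List (String × List (String × Int))) (concurrency_limits : List (String × Int)) (max_workers : Int) (out : List String) : Decidable (Spec_build_spawn_plan queue_counts concurrency_limits max_workers out) := by unfold Spec_build_spawn_plan; infer_instance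

-- ===== CLAIM (what is proved, stated in full; the proofs are below) =====
def Claim_equal_build_spawn_plan : Prop := ∀ (queue_counts : List (String × List (String × Int))) (concurrency_limits : List (String × Int)) (max_workers : Int), Dom_build_spawn_plan queue_counts concurrency_limits max_workers → Spec_build_spawn_plan queue_counts concurrency_limits max_workers (build_spawn_plan queue_counts concurrency_limits max_workers)

-- ===== LEMMAS AND PROOFS =====

-- the active queues (with their remaining capacities) hiding in A's dict state
def pvActOf (keys : List String) (cap : PySem.Dict String Int) : List (String × Int) :=
  keys.filterMap (fun k => if 0 < cap.getD k 0 then some (k, cap.getD k 0) else none)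

-- the active (key, capacity) pairs read off the input for a given key list
def pvActKeys (queue_counts : List (String × List (String × Int))) (concurrency_limits : List (String × Int)) (keys : List String) : List (String × Int) :=
  keys.filterMap (fun k => if 0 < pvCapA queue_counts concurrency_limits k then some (k, pvCapA queue_counts concurrency_limits k) else none)

-- one round-robin layer step
def pvStep (act : List (String × Int)) : List (String × Int) :=
  (act.filter (fun p => 1 < p.2)).map (fun p => (p.1, p.2 - 1))

def pvTot (act : List (String × Int)) : Int := (act.map Prod.snd).sum

-- first n names emitted by repeated layers over act
def pvEmit : Nat → List (String × Int) → Nat → List String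
  | 0, _, _ => []
  | f + 1, act, n =>
    if n = 0 then []
    else (act.map Prod.fst).take n ++ pvEmit f (pvStep act) (n - act.length)

-- the names of round r: queues whose original capacity exceeds r
def pvLayer (r : Nat) (act : List (String × Int)) : List String :=
  (act.filter (fun p => (r : Int) < p.2)).map Prod.fst

def pvNames (f : Nat) (act : List (String × Int)) : List String :=
  (List.range f).flatMap (fun r => pvLayer r act)

-- the slot token of queue p in round r, if p has capacity for round r
def pvF (r : Nat) (p : String × Int) : Option (Int × String) :=
  if (r : Int) < p.2 then some ((r : Int), p.1) else none

-- the slot tokens in round-major (= lexicographic) order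
def pvPairs (f : Nat) (act : List (String × Int)) : List (Int × String) :=
  (List.range f).flatMap (fun r => act.filterMap (pvF r))

theorem pvEmit_zero (f : Nat) (act : List (String × Int)) : pvEmit f act 0 = [] := by
  cases f <;> simp [pvEmit]

theorem pvTot_pos (act : List (String × Int)) (h : ∀ p ∈ act, 0 < p.2) :
    (act.length : Int) ≤ pvTot act := by
  induction act with
  | nil => simp [pvTot]
  | cons p t ih =>
    have := h p (by simp)
    have ht := ih (fun q hq => h q (by simp [hq]))
    simp [pvTot] at ht ⊢
    omega

theorem pvStep_pos (act : List (String × Int)) (_h : ∀ p ∈ act, 0 < p.2) :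
    ∀ p ∈ pvStep act, 0 < p.2 := by
  intro p hp
  simp [pvStep] at hp
  obtain ⟨a, b, ⟨_, hb⟩, h1, h2⟩ := hp
  omega

theorem pvStep_tot (act : List (String × Int)) (h : ∀ p ∈ act, 0 < p.2) :
    pvTot (pvStep act) = pvTot act - act.length := by
  induction act with
  | nil => simp [pvTot, pvStep]
  | cons p t ih =>
    have hp := h p (by simp)
    have ht := ih (fun q hq => h q (by simp [hq]))
    by_cases h1 : 1 < p.2 <;> simp [pvStep, pvTot, h1] at ht ⊢ <;> omega

-- A's inner loop, whole-round case: appends the active names, decrements their capacities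
theorem pvInnerA_full (keys : List String) (cap : PySem.Dict String Int) (plan : List String)
    (prog : Bool) (target : Nat) (hnd : keys.Nodup)
    (hle : plan.length + (pvActOf keys cap).length ≤ target) :
    ∃ cap', pvInnerA target keys cap plan prog =
        (cap', plan ++ (pvActOf keys cap).map Prod.fst, prog || !(pvActOf keys cap).isEmpty) ∧
      ∀ x, cap'.getD x 0 = if x ∈ keys ∧ 0 < cap.getD x 0 then cap.getD x 0 - 1 else cap.getD x 0 := by
  induction keys generalizing cap plan prog with
  | nil => exact ⟨cap, by simp [pvInnerA, pvActOf], by simp⟩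
  | cons k ks ih =>
    rw [List.nodup_cons] at hnd
    by_cases hbr : target ≤ plan.length
    · have hlen : (pvActOf (k :: ks) cap).length = 0 := by omega
      have hempty : pvActOf (k :: ks) cap = [] := List.length_eq_zero_iff.mp hlen
      have hforall := List.filterMap_eq_nil_iff.mp hempty
      refine ⟨cap, by simp [pvInnerA, hbr, hempty], ?_⟩
      intro x
      by_cases hx : x ∈ k :: ks
      · have := hforall x hx
        by_cases hpos : 0 < cap.getD x 0 <;> simp [hpos] at this ⊢
      · simp [hx]
    · by_cases hc : 0 < cap.getD k 0
      · have hact : pvActOf (k :: ks) cap = (k, cap.getD k 0) :: pvActOf ks cap := by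
          simp [pvActOf, hc]
        have hrest : pvActOf ks (cap.modify k 0 (· - 1)) = pvActOf ks cap := by
          unfold pvActOf
          apply List.filterMap_congr
          intro x hx
          have hne : x ≠ k := fun h => hnd.1 (h ▸ hx)
          simp [PySem.Dict.getD_modify, hne]
        have hle' : (plan ++ [k]).length + (pvActOf ks (cap.modify k 0 (· - 1))).length ≤ target := by
          rw [hrest]
          rw [hact] at hle
          simp at hle ⊢
          omega
        obtain ⟨cap', heq, hchar⟩ := ih (cap.modify k 0 (· - 1)) (plan ++ [k]) true hnd.2 hle'
        rw [hrest] at heq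
        refine ⟨cap', ?_, ?_⟩
        · rw [pvInnerA, if_neg hbr, if_pos hc, heq, hact]
          simp
        · intro x
          have hx := hchar x
          simp only [PySem.Dict.getD_modify] at hx
          by_cases hxk : x = k
          · subst hxk
            rw [hx]
            simp [hnd.1, hc]
          · rw [hx]
            simp [List.mem_cons, hxk]
      · have hact : pvActOf (k :: ks) cap = pvActOf ks cap := by
          simp [pvActOf, hc]
        obtain ⟨cap', heq, hchar⟩ := ih cap plan prog hnd.2 (by rw [hact] at hle; exact hle)
        refine ⟨cap', ?_, ?_⟩
        · rw [pvInnerA, if_neg hbr, if_neg hc, heq, hact]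
        · intro x
          rw [hchar x]
          by_cases hxk : x = k
          · subst hxk
            simp [hnd.1, hc]
          · simp [List.mem_cons, hxk]

theorem pvInnerA_exit (keys : List String) (cap : PySem.Dict String Int) (plan : List String)
    (prog : Bool) (target : Nat) (h : target ≤ plan.length) :
    pvInnerA target keys cap plan prog = (cap, plan, prog) := by
  cases keys <;> simp [pvInnerA, h]

-- A's inner loop, break case: fills the plan up to target and reports progress
theorem pvInnerA_partial (keys : List String) (cap : PySem.Dict String Int) (plan : List String)
    (prog : Bool) (target : Nat) (hnd : keys.Nodup) (hlt : plan.length < target)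
    (hge : target ≤ plan.length + (pvActOf keys cap).length) :
    (pvInnerA target keys cap plan prog).2.1 = plan ++ ((pvActOf keys cap).map Prod.fst).take (target - plan.length) ∧
    (pvInnerA target keys cap plan prog).2.2 = true := by
  induction keys generalizing cap plan prog with
  | nil =>
    simp [pvActOf] at hge
    omega
  | cons k ks ih =>
    rw [List.nodup_cons] at hnd
    have hbr : ¬ target ≤ plan.length := by omega
    by_cases hc : 0 < cap.getD k 0
    · have hact : pvActOf (k :: ks) cap = (k, cap.getD k 0) :: pvActOf ks cap := by
        simp [pvActOf, hc]
      have hrest : pvActOf ks (cap.modify k 0 (· - 1)) = pvActOf ks cap := by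
        unfold pvActOf
        apply List.filterMap_congr
        intro x hx
        have hne : x ≠ k := fun h => hnd.1 (h ▸ hx)
        simp [PySem.Dict.getD_modify, hne]
      by_cases hfin : target ≤ plan.length + 1
      · have htg : target = plan.length + 1 := by omega
        rw [pvInnerA, if_neg hbr, if_pos hc,
          pvInnerA_exit _ _ _ _ _ (by simp; omega), hact, htg]
        simp
      · have := ih (cap.modify k 0 (· - 1)) (plan ++ [k]) true hnd.2
          (by simp; omega) (by rw [hrest]; rw [hact] at hge; simp at hge ⊢; omega)
        rw [hrest] at this
        rw [pvInnerA, if_neg hbr, if_pos hc, this.1, hact]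
        refine ⟨?_, this.2⟩
        rw [show target - plan.length = (target - (plan ++ [k]).length) + 1 from by simp; omega]
        simp [List.take_succ_cons]
    · have hact : pvActOf (k :: ks) cap = pvActOf ks cap := by
        simp [pvActOf, hc]
      rw [hact] at hge
      have := ih cap plan prog hnd.2 hlt hge
      rw [pvInnerA, if_neg hbr, if_neg hc, hact]
      exact this

theorem pvOuterA_exit (f : Nat) (keys : List String) (target : Nat) (cap : PySem.Dict String Int)
    (plan : List String) (h : target ≤ plan.length) : pvOuterA f keys target cap plan = plan := by
  cases f <;> simp [pvOuterA, h]

-- decrementing every positive capacity turns A's active list into the next layer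
theorem pvActOf_step (keys : List String) (cap cap' : PySem.Dict String Int) (hnd : keys.Nodup)
    (h : ∀ x ∈ keys, cap'.getD x 0 = if x ∈ keys ∧ 0 < cap.getD x 0 then cap.getD x 0 - 1 else cap.getD x 0) :
    pvActOf keys cap' = pvStep (pvActOf keys cap) := by
  induction keys with
  | nil => simp [pvActOf, pvStep]
  | cons k ks ih =>
    rw [List.nodup_cons] at hnd
    have hk : cap'.getD k 0 = if 0 < cap.getD k 0 then cap.getD k 0 - 1 else cap.getD k 0 := by
      simpa using h k (by simp)
    have ihh : pvActOf ks cap' = pvStep (pvActOf ks cap) := by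
      refine ih hnd.2 (fun x hx => ?_)
      have := h x (by simp [hx])
      simpa [hx] using this
    by_cases hc : 0 < cap.getD k 0
    · rw [if_pos hc] at hk
      rw [show pvActOf (k :: ks) cap = (k, cap.getD k 0) :: pvActOf ks cap from by
        simp [pvActOf, hc]]
      by_cases h1 : 1 < cap.getD k 0
      · have h0 : 0 < cap'.getD k 0 := by rw [hk]; omega
        rw [show pvActOf (k :: ks) cap' = (k, cap'.getD k 0) :: pvActOf ks cap' from by
          simp [pvActOf, h0], ihh]
        simp [pvStep, h1, hk]
      · have h0 : ¬ 0 < cap'.getD k 0 := by rw [hk]; omega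
        rw [show pvActOf (k :: ks) cap' = pvActOf ks cap' from by simp [pvActOf, h0], ihh]
        simp [pvStep, h1]
    · have h0 : ¬ 0 < cap'.getD k 0 := by rw [hk, if_neg hc]; exact hc
      rw [show pvActOf (k :: ks) cap = pvActOf ks cap from by simp [pvActOf, hc],
        show pvActOf (k :: ks) cap' = pvActOf ks cap' from by simp [pvActOf, h0], ihh]

theorem pvActOf_pos (keys : List String) (cap : PySem.Dict String Int) :
    ∀ p ∈ pvActOf keys cap, 0 < p.2 := by
  intro p hp
  simp [pvActOf] at hp
  obtain ⟨k, _, hk⟩ := hp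
  by_cases h : 0 < cap.getD k 0 <;> simp [h] at hk
  rw [← hk]
  exact h

-- A's outer loop emits the layered round-robin names
theorem pvOuterA_eq (fuel : Nat) (keys : List String) (cap : PySem.Dict String Int) (n : Nat)
    (plan : List String) (hnd : keys.Nodup) (htot : (n : Int) ≤ pvTot (pvActOf keys cap))
    (hfuel : n ≤ fuel) :
    pvOuterA fuel keys (plan.length + n) cap plan = plan ++ pvEmit fuel (pvActOf keys cap) n := by
  induction fuel generalizing cap plan n with
  | zero =>
    have hn : n = 0 := by omega
    subst hn
    simp [pvOuterA, pvEmit]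
  | succ f ih =>
    by_cases hn : n = 0
    · subst hn
      simp [pvOuterA, pvEmit]
    · have hcond : ¬ (plan.length + n ≤ plan.length) := by omega
      have hpos := pvActOf_pos keys cap
      have hact : pvActOf keys cap ≠ [] := by
        intro h
        rw [h] at htot
        simp [pvTot] at htot
        omega
      have hL : 1 ≤ (pvActOf keys cap).length := List.length_pos_iff.mpr hact
      have hempty : (pvActOf keys cap).isEmpty = false := by simp [hact]
      rw [pvOuterA, if_neg hcond]
      by_cases hcase : (pvActOf keys cap).length ≤ n
      · obtain ⟨cap', heq, hchar⟩ :=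
          pvInnerA_full keys cap plan false (plan.length + n) hnd (by omega)
        rw [heq]
        simp only [hempty, Bool.not_false]
        have hstepact : pvActOf keys cap' = pvStep (pvActOf keys cap) :=
          pvActOf_step keys cap cap' hnd (fun x _ => hchar x)
        have htot' : ((n - (pvActOf keys cap).length : Nat) : Int) ≤ pvTot (pvActOf keys cap') := by
          rw [hstepact, pvStep_tot _ hpos]
          omega
        have := ih cap' (n - (pvActOf keys cap).length) (plan ++ (pvActOf keys cap).map Prod.fst)
          htot' (by omega)
        rw [show (plan ++ (pvActOf keys cap).map Prod.fst).length + (n - (pvActOf keys cap).length)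
            = plan.length + n from by simp; omega] at this
        rw [this, hstepact, pvEmit, if_neg hn]
        simp [List.take_of_length_le (show ((pvActOf keys cap).map Prod.fst).length ≤ n by simp; omega)]
      · obtain ⟨hp1, hp2⟩ :=
          pvInnerA_partial keys cap plan false (plan.length + n) hnd (by omega) (by omega)
        rcases hre : pvInnerA (plan.length + n) keys cap plan false with ⟨c0, p0, b0⟩
        rw [hre] at hp1 hp2
        simp only at hp1 hp2
        simp only [hp2, if_true]
        rw [hp1]
        have hlen : plan.length + n ≤ (plan ++ ((pvActOf keys cap).map Prod.fst).take (plan.length + n - plan.length)).length := by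
          simp
          omega
        rw [pvOuterA_exit _ _ _ _ _ hlen]
        rw [pvEmit, if_neg hn, show n - (pvActOf keys cap).length = 0 from by omega, pvEmit_zero]
        simp

-- round r + 1 of a list is round r of its decremented survivors
theorem pvLayer_succ (r : Nat) (act : List (String × Int)) :
    pvLayer (r + 1) act = pvLayer r (pvStep act) := by
  unfold pvLayer pvStep
  rw [List.filter_map, List.map_map, List.filter_filter]
  rw [List.filter_congr (q := fun p : String × Int =>
      (decide ((r:Int) < ((fun p : String × Int => (p.1, p.2 - 1)) p).2)) && decide (1 < p.2))
    (fun p _ => by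
      by_cases h1 : 1 < p.2 <;> by_cases h2 : (r:Int) < p.2 - 1 <;>
        simp [h1, h2] <;> omega)]
  rfl

theorem pvNames_succ (f : Nat) (act : List (String × Int)) (hpos : ∀ p ∈ act, 0 < p.2) :
    pvNames (f + 1) act = act.map Prod.fst ++ pvNames f (pvStep act) := by
  have h0 : pvLayer 0 act = act.map Prod.fst := by
    unfold pvLayer
    rw [List.filter_eq_self.mpr (fun p hp => by simpa using hpos p hp)]
  unfold pvNames
  rw [List.range_succ_eq_map, List.flatMap_cons, List.flatMap_map, h0]
  congr 1
  exact List.flatMap_congr (fun r _ => pvLayer_succ r act)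

-- the round-robin emission is a truncation of the layered name list
theorem pvEmit_eq_take (f : Nat) (act : List (String × Int)) (n : Nat)
    (hpos : ∀ p ∈ act, 0 < p.2) : pvEmit f act n = (pvNames f act).take n := by
  induction f generalizing act n with
  | zero => simp [pvEmit, pvNames]
  | succ f ih =>
    by_cases hn : n = 0
    · simp [hn, pvEmit]
    · rw [pvEmit, if_neg hn, pvNames_succ f act hpos, List.take_append,
        ih (pvStep act) (n - act.length) (pvStep_pos act hpos)]
      simp

theorem pvNames_len (f : Nat) (act : List (String × Int)) (n : Nat)
    (hpos : ∀ p ∈ act, 0 < p.2) (hf : n ≤ f) (htot : (n : Int) ≤ pvTot act) :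
    n ≤ (pvNames f act).length := by
  induction f generalizing act n with
  | zero => omega
  | succ f ih =>
    rw [pvNames_succ f act hpos]
    by_cases hc : n ≤ act.length
    · simp
      omega
    · have hne : act ≠ [] := by
        intro h
        subst h
        simp [pvTot] at htot
        simp at hc
        omega
      have hL : 1 ≤ act.length := List.length_pos_iff.mpr hne
      have := ih (pvStep act) (n - act.length) (pvStep_pos act hpos) (by omega)
        (by rw [pvStep_tot act hpos]; omega)
      simp
      omega

theorem pvNames_take_succ (f : Nat) (act : List (String × Int)) (n : Nat)
    (hlen : n ≤ (pvNames f act).length) :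
    (pvNames (f + 1) act).take n = (pvNames f act).take n := by
  unfold pvNames
  rw [List.range_succ, List.flatMap_append, List.take_append,
    show n - ((List.range f).flatMap fun r => pvLayer r act).length = 0 from by
      unfold pvNames at hlen; omega]
  simp

-- the layer names are the second components of the round's slot tokens
theorem pvPairs_layer_snd (r : Nat) (act : List (String × Int)) :
    (act.filterMap (pvF r)).map Prod.snd = pvLayer r act := by
  induction act with
  | nil => simp [pvLayer]
  | cons p t ih =>
    by_cases h : (r : Int) < p.2 <;> simp [pvF, pvLayer, h] at ih ⊢ <;>
      simpa [pvF, pvLayer] using ih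

theorem pvPairs_map_snd (f : Nat) (act : List (String × Int)) :
    (pvPairs f act).map Prod.snd = pvNames f act := by
  unfold pvPairs pvNames
  rw [List.map_flatMap]
  exact List.flatMap_congr (fun r _ => pvPairs_layer_snd r act)

-- a double flatMap over two independent lists commutes up to permutation
theorem pvFlatMap_comm {α γ β : Type} (xs : List α) (ys : List γ) (F : α → γ → List β) :
    (xs.flatMap fun x => ys.flatMap fun y => F x y).Perm
      (ys.flatMap fun y => xs.flatMap fun x => F x y) := by
  induction xs with
  | nil => simp
  | cons x t ih =>
    simp only [List.flatMap_cons]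
    refine ((List.Perm.append_left _ ih).trans ?_)
    exact (List.flatMap_append_perm ys (fun y => F x y) (fun y => t.flatMap fun x => F x y))

theorem pvFilterMap_comm {α γ β : Type} (xs : List α) (ys : List γ) (F : α → γ → Option β) :
    (xs.flatMap fun x => ys.filterMap fun y => F x y).Perm
      (ys.flatMap fun y => xs.filterMap fun x => F x y) := by
  have h1 : ∀ (l : List γ) (g : γ → Option β), l.filterMap g = l.flatMap fun y => (g y).toList :=
    fun l g => List.filterMap_eq_flatMap_toList g l
  have h2 : ∀ (l : List α) (g : α → Option β), l.filterMap g = l.flatMap fun y => (g y).toList :=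
    fun l g => List.filterMap_eq_flatMap_toList g l
  simp only [h1, h2]
  exact pvFlatMap_comm xs ys (fun x y => (F x y).toList)

-- the per-queue token range is the filtered round range
theorem pvRangeFilter (p : String × Int) (n : Nat) (hp : 0 ≤ p.2) :
    ((PySem.List.pyRange 0 (min p.2 (n : Int))).map (fun r => (r, p.1))) =
      (List.range n).filterMap (fun r => pvF r p) := by
  have hm : min p.2 (n : Int) = (((min p.2 (n : Int)).toNat : Nat) : Int) := by omega
  set m := (min p.2 (n : Int)).toNat with hmdef
  have hmn : m ≤ n := by omega
  clear_value m
  have hlhs : (PySem.List.pyRange 0 (min p.2 (n : Int))).map (fun r => (r, p.1)) =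
      List.map (fun k : Nat => ((k : Int), p.1)) (List.range m) := by
    rw [hm, PySem.List.pyRange_zero_natCast, List.map_map]
    rfl
  rw [hlhs, show n = m + (n - m) from by omega, List.range_add, List.filterMap_append]
  have hfirst : (List.range m).filterMap (fun r => pvF r p) =
      List.map (fun k : Nat => ((k : Int), p.1)) (List.range m) := by
    rw [List.filterMap_congr (g := fun r : Nat => some ((r : Int), p.1)) (fun r hr => by
      have hr' : r < m := List.mem_range.mp hr
      simp only [pvF, if_pos (show (r : Int) < p.2 from by omega)])]
    exact congrFun List.filterMap_eq_map (List.range m)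
  have hsecond : ((List.range (n - m)).map (fun x => m + x)).filterMap (fun r => pvF r p) = [] := by
    rw [List.filterMap_eq_nil_iff]
    intro r hr
    simp only [List.mem_map, List.mem_range] at hr
    obtain ⟨j, hj, rfl⟩ := hr
    simp only [pvF, ite_eq_right_iff]
    intro h
    omega
  rw [hfirst, hsecond, List.append_nil]

-- the round-major token list is strictly increasing in the lexicographic order
theorem pvPairs_pairwise (n : Nat) (act : List (String × Int))
    (hk : act.Pairwise (fun p q => p.1 < q.1)) :
    (pvPairs n act).Pairwise (fun a b => toLex a < toLex b) := by
  unfold pvPairs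
  rw [List.flatMap_def, List.pairwise_flatten]
  constructor
  · intro l hl
    simp only [List.mem_map, List.mem_range] at hl
    obtain ⟨r, _, rfl⟩ := hl
    rw [List.pairwise_filterMap]
    refine hk.imp_of_mem (fun {p q} _ _ hpq => ?_)
    intro b hb b' hb'
    simp only [pvF, Option.ite_none_right_eq_some, Option.some.injEq] at hb hb'
    obtain ⟨-, rfl⟩ := hb
    obtain ⟨-, rfl⟩ := hb'
    rw [Prod.Lex.lt_iff]
    right
    exact ⟨rfl, hpq⟩
  · rw [List.pairwise_map]
    refine (List.pairwise_lt_range).imp_of_mem (fun {r1 r2} _ _ h12 => ?_)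
    intro x hx y hy
    simp only [List.mem_filterMap] at hx hy
    obtain ⟨p, -, hp⟩ := hx
    obtain ⟨q, -, hq⟩ := hy
    simp only [pvF, Option.ite_none_right_eq_some, Option.some.injEq] at hp hq
    obtain ⟨-, rfl⟩ := hp
    obtain ⟨-, rfl⟩ := hq
    rw [Prod.Lex.lt_iff]
    left
    show (r1 : Int) < (r2 : Int)
    exact_mod_cast h12

-- Python's sorted() on (int, str) tuples is sorting by the lexicographic key
theorem pvSorted2_eq_sorted_lex (xs : List (Int × String)) :
    PySem.List.sorted2 xs Prod.fst Prod.snd = PySem.List.sorted xs (fun p => toLex p) := by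
  rw [PySem.List.sorted_eq_foldl_insertBy]
  show List.foldl (fun acc x => PySem.List.insertBy
      (fun a b => decide (a.1 < b.1) || (!decide (b.1 < a.1) && decide (a.2 < b.2))) x acc) [] xs = _
  have hfun : (fun (a b : Int × String) =>
      decide (a.1 < b.1) || (!decide (b.1 < a.1) && decide (a.2 < b.2))) =
      (fun (a b : Int × String) => decide (toLex a < toLex b)) := by
    funext a b
    have hlex : (toLex a < toLex b) ↔ (a.1 < b.1 ∨ (a.1 = b.1 ∧ a.2 < b.2)) := Prod.Lex.lt_iff
    by_cases h1 : a.1 < b.1 <;> by_cases h2 : b.1 < a.1 <;>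
      by_cases h3 : a.2 < b.2 <;> simp [h1, h2, h3, hlex] <;> omega
  rw [hfun]

-- B's caps loop reads off the positive A-capacities (their formulas agree when positive)
theorem pvCapsB_eq (queue_counts : List (String × List (String × Int)))
    (concurrency_limits : List (String × Int)) (ks : List String) :
    pvCapsB queue_counts concurrency_limits ks = pvActKeys queue_counts concurrency_limits ks := by
  induction ks with
  | nil => simp [pvCapsB, pvActKeys]
  | cons k t ih =>
    have hAB : pvCapA queue_counts concurrency_limits k =
        max (pvCapB queue_counts concurrency_limits k) 0 := rfl
    by_cases hc : 0 < pvCapB queue_counts concurrency_limits k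
    · have hA : 0 < pvCapA queue_counts concurrency_limits k := by rw [hAB]; omega
      have hv : pvCapA queue_counts concurrency_limits k =
          pvCapB queue_counts concurrency_limits k := by rw [hAB]; omega
      simp [pvCapsB, pvActKeys, hc, hv] at ih ⊢
      simpa [pvActKeys] using ih
    · have hA : ¬ 0 < pvCapA queue_counts concurrency_limits k := by rw [hAB]; omega
      simp [pvCapsB, pvActKeys, hc, hA] at ih ⊢
      simpa [pvActKeys] using ih

theorem pvActKeys_pos (queue_counts : List (String × List (String × Int)))
    (concurrency_limits : List (String × Int)) (ks : List String) :
    ∀ p ∈ pvActKeys queue_counts concurrency_limits ks, 0 < p.2 := by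
  intro p hp
  simp only [pvActKeys, List.mem_filterMap] at hp
  obtain ⟨k, _, hk⟩ := hp
  by_cases h : 0 < pvCapA queue_counts concurrency_limits k <;> simp [h] at hk
  rw [← hk]
  exact h

theorem pvCapA_nonneg (queue_counts : List (String × List (String × Int)))
    (concurrency_limits : List (String × Int)) (k : String) :
    0 ≤ pvCapA queue_counts concurrency_limits k := by
  simp [pvCapA]

theorem pvTot_actKeys (queue_counts : List (String × List (String × Int)))
    (concurrency_limits : List (String × Int)) (ks : List String) :
    pvTot (pvActKeys queue_counts concurrency_limits ks) =
      (ks.map (pvCapA queue_counts concurrency_limits)).sum := by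
  induction ks with
  | nil => simp [pvActKeys, pvTot]
  | cons k t ih =>
    have h0 := pvCapA_nonneg queue_counts concurrency_limits k
    by_cases hc : 0 < pvCapA queue_counts concurrency_limits k <;>
      simp [pvActKeys, pvTot, hc] at ih ⊢ <;> omega

theorem pvActOf_eq_actKeys (queue_counts : List (String × List (String × Int)))
    (concurrency_limits : List (String × Int)) (D : PySem.Dict String Int) (ks : List String)
    (h : ∀ x ∈ ks, D.getD x 0 = pvCapA queue_counts concurrency_limits x) :
    pvActOf ks D = pvActKeys queue_counts concurrency_limits ks := by
  unfold pvActOf pvActKeys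
  exact List.filterMap_congr (fun x hx => by rw [h x hx])

-- ===== VERDICT (by name: the statement is the Claim_ definition above) =====
theorem build_spawn_plan_spec : Claim_equal_build_spawn_plan := by
  intro queue_counts concurrency_limits max_workers _
  show build_spawn_plan queue_counts concurrency_limits max_workers
      = build_spawn_plan_alt queue_counts concurrency_limits max_workers
  set keys := pvKeysA queue_counts concurrency_limits with hkeys
  set uni := PySem.Set.union (PySem.Set.ofList (queue_counts.map Prod.fst)) (concurrency_limits.map Prod.fst) with huni
  have hkperm : keys.Perm uni := by
    rw [hkeys, pvKeysA, huni]
    exact PySem.List.sorted_perm _ _ _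
  have hund : uni.Nodup := PySem.Set.nodup_union _ _ (PySem.Set.nodup_ofList _)
  have hnd : keys.Nodup := hkperm.symm.nodup hund
  have hkle : keys.Pairwise (fun a b => a ≤ b) := by
    rw [hkeys, pvKeysA]
    exact PySem.List.sorted_pairwise _ _
  have hklt : keys.Pairwise (fun a b => a < b) :=
    (hkle.and hnd).imp (fun h => lt_of_le_of_ne h.1 h.2)
  set f := pvCapA queue_counts concurrency_limits with hf
  set D := keys.foldl (fun d k => d.insert k (f k)) PySem.Dict.empty with hD
  have hitems : D.items = keys.map (fun k => (k, f k)) := by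
    rw [hD]
    have := PySem.Dict.items_foldl_insert_fresh keys (fun a => a) f PySem.Dict.empty
      (fun a _ => PySem.Dict.contains_empty a) (by simpa using hnd)
    simpa using this
  have hdk : D.keys.Nodup := by
    simp only [PySem.Dict.keys, hitems, List.map_map, Function.comp_def]
    simpa using hnd
  have hgetD : ∀ x ∈ keys, D.getD x 0 = f x := by
    intro x hx
    exact PySem.Dict.getD_of_mem_items D (by rw [hitems]; exact List.mem_map_of_mem hx) hdk 0
  set act := pvActKeys queue_counts concurrency_limits keys with hact
  have hactA : pvActOf keys D = act :=
    pvActOf_eq_actKeys _ _ D keys (fun x hx => by rw [hgetD x hx])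
  have hcaps : pvCapsB queue_counts concurrency_limits uni =
      pvActKeys queue_counts concurrency_limits uni := pvCapsB_eq _ _ _
  have hcperm : (pvActKeys queue_counts concurrency_limits uni).Perm act :=
    List.Perm.filterMap _ hkperm.symm
  have hposact : ∀ p ∈ act, 0 < p.2 := pvActKeys_pos _ _ _
  have hposcaps : ∀ p ∈ pvActKeys queue_counts concurrency_limits uni, 0 < p.2 :=
    pvActKeys_pos _ _ _
  have hvals : D.values = keys.map f := by
    simp only [PySem.Dict.values, hitems, List.map_map]
    rfl
  have hDv : D.values.sum = pvTot act := by
    rw [hvals, hact, pvTot_actKeys]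
  have hsums : ((pvActKeys queue_counts concurrency_limits uni).map Prod.snd).sum = pvTot act :=
    (hcperm.map Prod.snd).sum_eq
  have hactkeys : act.Pairwise (fun p q => p.1 < q.1) := by
    rw [hact]
    unfold pvActKeys
    rw [List.pairwise_filterMap]
    refine hklt.imp_of_mem (fun {a b} _ _ hab => ?_)
    intro x hx y hy
    simp only [Option.ite_none_right_eq_some, Option.some.injEq] at hx hy
    obtain ⟨-, rfl⟩ := hx
    obtain ⟨-, rfl⟩ := hy
    exact hab
  have hAeq : build_spawn_plan queue_counts concurrency_limits max_workers =
      (if D.values.sum ≤ 0 ∨ max_workers ≤ 0 then []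
       else pvOuterA ((min D.values.sum max_workers).toNat + 1) keys
         (min D.values.sum max_workers).toNat D []) := rfl
  have hBeq : build_spawn_plan_alt queue_counts concurrency_limits max_workers =
      (if max_workers ≤ 0 then []
       else
        (PySem.List.slice (PySem.List.sorted2
          ((pvCapsB queue_counts concurrency_limits uni).flatMap
            (fun p => (PySem.List.pyRange 0 (min p.2 (min ((pvCapsB queue_counts concurrency_limits uni).map Prod.snd).sum max_workers))).map (fun r => (r, p.1))))
          Prod.fst Prod.snd) none
          (some (min ((pvCapsB queue_counts concurrency_limits uni).map Prod.snd).sum max_workers))).map Prod.snd) := rfl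
  rw [hAeq, hBeq, hDv, hcaps, hsums]
  by_cases hmw : max_workers ≤ 0
  · simp [hmw]
  · rw [if_neg hmw]
    have htotnn : 0 ≤ pvTot act := by
      have := pvTot_pos act hposact
      omega
    by_cases htz : pvTot act ≤ 0
    · have hnilact : act = [] := by
        by_contra hne
        have hL : 1 ≤ act.length := List.length_pos_iff.mpr hne
        have := pvTot_pos act hposact
        omega
      have hnilcaps : pvActKeys queue_counts concurrency_limits uni = [] :=
        List.Perm.eq_nil (hnilact ▸ hcperm)
      rw [if_pos (Or.inl htz), hnilcaps]
      rw [show min (pvTot act) max_workers = 0 from by omega,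
        List.flatMap_nil,
        show PySem.List.sorted2 ([] : List (Int × String)) Prod.fst Prod.snd = [] from rfl,
        PySem.List.slice_to _ (by omega : (0:Int) ≤ 0)]
      simp
    · rw [if_neg (by omega : ¬ (pvTot act ≤ 0 ∨ max_workers ≤ 0))]
      set t := min (pvTot act) max_workers with ht
      have htpos : 0 < t := by omega
      set n := t.toNat with hn
      have htn : t = (n : Int) := by omega
      -- A side
      have hA := pvOuterA_eq (n + 1) keys D n [] hnd
        (by rw [hactA]; omega) (by omega)
      simp only [List.length_nil, Nat.zero_add, List.nil_append] at hA
      rw [hA, hactA, pvEmit_eq_take _ _ _ hposact,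
        pvNames_take_succ n act n (pvNames_len n act n hposact (le_refl n) (by omega))]
      -- B side
      have hchain : (pvPairs n act).Perm
          ((pvActKeys queue_counts concurrency_limits uni).flatMap
            (fun p => (PySem.List.pyRange 0 (min p.2 t)).map (fun r => (r, p.1)))) := by
        have hcong : (pvActKeys queue_counts concurrency_limits uni).flatMap
            (fun p => (PySem.List.pyRange 0 (min p.2 t)).map (fun r => (r, p.1))) =
            (pvActKeys queue_counts concurrency_limits uni).flatMap
            (fun p => (List.range n).filterMap (fun r => pvF r p)) := by
          refine List.flatMap_congr (fun p hp => ?_)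
          rw [htn]
          exact pvRangeFilter p n (le_of_lt (hposcaps p hp))
        rw [hcong]
        have hswap : ((pvActKeys queue_counts concurrency_limits uni).flatMap
            (fun p => (List.range n).filterMap (fun r => pvF r p))).Perm
            ((List.range n).flatMap (fun r =>
              (pvActKeys queue_counts concurrency_limits uni).filterMap (pvF r))) :=
          pvFilterMap_comm _ _ (fun p r => pvF r p)
        have hlayers : ((List.range n).flatMap (fun r =>
            (pvActKeys queue_counts concurrency_limits uni).filterMap (pvF r))).Perm
            (pvPairs n act) := by
          unfold pvPairs
          exact List.Perm.flatMap (List.Perm.refl _) (fun r _ => List.Perm.filterMap _ hcperm)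
        exact (hswap.trans hlayers).symm
      rw [pvSorted2_eq_sorted_lex,
        PySem.List.sorted_eq_of_perm_of_pairwise_lt _ _ _ hchain (pvPairs_pairwise n act hactkeys),
        PySem.List.slice_to _ (by omega : (0:Int) ≤ t), ← hn,
        List.map_take, pvPairs_map_snd]
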